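-- pv_equiv track=rewrite | github.com/nitinpathania007/python | Assignment2python.py | find
-- ===== SOURCE A (Python) =====
-- def find(strng, ch):
--     index = 0
--     countone = ""
--     countzero = ""
--     while index < len(strng):
--         if strng[index] == ch:
--             index=str(index)
--             countone += index
--             index=int(index)
--             index += 1
--         else:
--             index=str(index)
--             countzero += index
--             index=int(index)
--             index += 1
--     return countzero,countone
-- ===== SOURCE B (Python) =====
-- def find(strng, ch):
--     n = len(strng)
--     if len(ch) != 1:
--         # a single character can never equal a non-1-length string
--         return ("".join(map(str, range(n))), "")
--     zeros = []
--     ones = []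
--     pos = 0
--     while True:
--         p = strng.find(ch, pos)
--         if p == -1:
--             zeros.append("".join(map(str, range(pos, n))))
--             break
--         zeros.append("".join(map(str, range(pos, p))))
--         ones.append(str(p))
--         pos = p + 1
--     return ("".join(zeros), "".join(ones))
-- ===== Notes on version B (the rewrite author's own statement) =====
-- stated objective: faster
-- what changed: Instead of A's per-character while-loop that tests each position with if/else and round-trips the index through str()/int() while growing two strings by repeated +=, B locates the match positions by repeated str.find jumps, emits each block of non-matching indices between two matches with one range join, and joins the collected pieces once at the end.
import Mathlib
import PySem

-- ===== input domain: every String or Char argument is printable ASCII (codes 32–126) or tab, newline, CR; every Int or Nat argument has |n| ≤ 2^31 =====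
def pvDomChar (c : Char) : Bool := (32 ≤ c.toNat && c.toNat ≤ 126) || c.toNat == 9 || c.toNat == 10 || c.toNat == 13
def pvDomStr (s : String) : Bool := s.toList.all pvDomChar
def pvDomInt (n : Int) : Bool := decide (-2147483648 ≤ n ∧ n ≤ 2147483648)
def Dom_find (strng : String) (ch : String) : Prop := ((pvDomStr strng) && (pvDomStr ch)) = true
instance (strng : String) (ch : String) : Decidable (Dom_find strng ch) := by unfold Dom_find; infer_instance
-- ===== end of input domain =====

-- B finds the match positions by repeated str.find jumps and emits each block of skipped
-- (non-matching) indices with one range join, instead of A's per-character if/else loop that grows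
-- two strings by repeated +=; objective: faster (measured).

-- ===== PORT A =====
def findGo (chL : List Char) : List Char → Int → List Char → List Char → List Char × List Char
  | [], _, countzero, countone => (countzero, countone)
  | c :: rest, index, countzero, countone =>
    if [c] = chL then
      findGo chL rest (index + 1) countzero (countone ++ PySem.Int.toChars index)
    else
      findGo chL rest (index + 1) (countzero ++ PySem.Int.toChars index) countone

def find (strng : String) (ch : String) : String × String :=
  let r := findGo ch.toList strng.toList 0 [] []
  (String.ofList r.1, String.ofList r.2)

-- ===== PORT B =====
-- Source B's `strng.find(ch, pos)` equals `pos + find(strng[pos:], ch)` when the latter is not -1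
-- (this is PySem.Chars.findFrom_natCast); the port carries the remaining suffix `cs` = strng[pos:]
-- together with its absolute offset `pos`, so `PySem.Chars.find cs [c]` is exactly that search,
-- and `"".join(map(str, range(a, b)))` is `(pyRange a b 1).flatMap PySem.Int.toChars`.
def findAltGo (c : Char) (cs : List Char) (pos : Int) : List Char × List Char :=
  let f := PySem.Chars.find cs [c]
  if f = -1 then
    ((PySem.List.pyRange pos (pos + cs.length) 1).flatMap PySem.Int.toChars, [])
  else
    let r := findAltGo c (cs.drop (f.toNat + 1)) (pos + f + 1)
    ((PySem.List.pyRange pos (pos + f) 1).flatMap PySem.Int.toChars ++ r.1,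
     PySem.Int.toChars (pos + f) ++ r.2)
termination_by cs.length
decreasing_by
  have h0 : (0:Int) ≤ PySem.Chars.find cs [c] := by
    have := PySem.Chars.neg_one_le_find cs [c]; omega
  have hinf : [c] <:+: cs := (PySem.Chars.find_nonneg_iff cs [c]).mp h0
  have hne : cs ≠ [] := by rintro rfl; simpa using hinf.sublist.subset (List.mem_singleton_self c)
  have : 0 < cs.length := List.length_pos_iff.mpr hne
  simp [List.length_drop]; omega

def find_alt (strng : String) (ch : String) : String × String :=
  match ch.toList with
  | [c] =>
      let r := findAltGo c strng.toList 0
      (String.ofList r.1, String.ofList r.2)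
  | _ => (String.ofList ((PySem.List.pyRange 0 (strng.toList.length : Int) 1).flatMap PySem.Int.toChars), "")

-- ===== PRECONDITION & SPEC =====
def Spec_find (strng : String) (ch : String) (out : String × String) : Prop := out = find_alt strng ch
instance (strng : String) (ch : String) (out : String × String) : Decidable (Spec_find strng ch out) := by unfold Spec_find; infer_instance

-- ===== CLAIM (what is proved, stated in full; the proofs are below) =====
def Claim_equal_find : Prop := ∀ (strng : String) (ch : String), Dom_find strng ch → Spec_find strng ch (find strng ch)

-- ===== LEMMAS AND PROOFS =====

-- A's loop computes the two filtered flat-maps over the enumerated characters.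
lemma findGo_eq (chL cs : List Char) (i : Int) (cz co : List Char) :
    findGo chL cs i cz co =
      (cz ++ ((PySem.List.enumerate cs i).filter (fun p => !([p.2] == chL))).flatMap (fun p => PySem.Int.toChars p.1),
       co ++ ((PySem.List.enumerate cs i).filter (fun p => [p.2] == chL)).flatMap (fun p => PySem.Int.toChars p.1)) := by
  induction cs generalizing i cz co with
  | nil => simp [findGo, PySem.List.enumerate_nil]
  | cons c rest ih =>
    simp only [findGo, PySem.List.enumerate_cons, List.filter_cons]
    by_cases h : [c] = chL
    · simp [h, ih]
    · simp [h, ih]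

-- flat-mapping str over the enumerated indices is flat-mapping it over the index range
lemma flatMap_enumerate_all (cs : List Char) (i : Int) :
    (PySem.List.enumerate cs i).flatMap (fun p => PySem.Int.toChars p.1) =
      (PySem.List.pyRange i (i + cs.length) 1).flatMap PySem.Int.toChars := by
  induction cs generalizing i with
  | nil =>
      simp [PySem.List.enumerate_nil]
  | cons x rest ih =>
      have hb : i + (((x :: rest).length : Nat) : Int) = (i + 1) + (rest.length : Int) := by
        push_cast [List.length_cons]; ring
      have hlt : i < (i + 1) + (rest.length : Int) := by
        have := Int.natCast_nonneg rest.length; omega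
      rw [PySem.List.enumerate_cons, List.flatMap_cons, ih, hb,
          PySem.List.pyRange_one_cons hlt, List.flatMap_cons]

lemma singleton_prefix_drop (l : List Char) (c : Char) (j : Nat) :
    [c] <+: l.drop j ↔ l[j]? = some c := by
  rw [← List.head?_drop]
  cases h : l.drop j with
  | nil => simp
  | cons a t => constructor
                · rintro ⟨s, hs⟩; simp_all
                · intro ha; simp_all

lemma singleton_infix (l : List Char) (c : Char) : [c] <:+: l ↔ c ∈ l := by
  constructor
  · intro h; exact h.sublist.subset (List.mem_singleton_self c)
  · intro h
    obtain ⟨s, t, rfl⟩ := List.append_of_mem h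
    exact ⟨s, t, by simp⟩

-- PySem.Chars.find on a singleton needle is List.findIdx?.
lemma find_singleton (l : List Char) (c : Char) :
    PySem.Chars.find l [c] = ((l.findIdx? (fun x => x == c)).map (fun j : Nat => (j : Int))).getD (-1) := by
  cases h : l.findIdx? (fun x => x == c) with
  | none =>
    have hnm : c ∉ l := by
      intro hm
      obtain ⟨k, hk, hck⟩ := List.getElem_of_mem hm
      have := List.findIdx?_eq_none_iff.mp h _ (hck ▸ List.getElem_mem hk)
      simp at this
    rw [(PySem.Chars.find_eq_neg_one_iff l [c]).mpr (by rw [singleton_infix]; exact hnm)]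
    simp
  | some k =>
    obtain ⟨hk, hck, hmin⟩ := List.findIdx?_eq_some_iff_getElem.mp h
    have hck' : l[k] = c := by simpa using hck
    have hmem : c ∈ l := hck' ▸ List.getElem_mem hk
    have h0 : 0 ≤ PySem.Chars.find l [c] :=
      (PySem.Chars.find_nonneg_iff l [c]).mpr ((singleton_infix l c).mpr hmem)
    obtain ⟨hpre, hfirst⟩ := PySem.Chars.find_spec h0
    have hgk : l[(PySem.Chars.find l [c]).toNat]? = some c :=
      (singleton_prefix_drop l c _).mp hpre
    have hlen : (PySem.Chars.find l [c]).toNat < l.length := by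
      by_contra hge
      rw [List.getElem?_eq_none (by omega)] at hgk; simp at hgk
    have hkle : ¬ (PySem.Chars.find l [c]).toNat < k := by
      intro hlt
      have hnotp := hmin _ hlt
      rw [List.getElem?_eq_getElem hlen] at hgk
      simp only [Option.some.injEq] at hgk
      simp [hgk] at hnotp
    have hlek : ¬ k < (PySem.Chars.find l [c]).toNat := by
      intro hlt
      exact hfirst k hlt ((singleton_prefix_drop l c k).mpr (by simp [List.getElem?_eq_getElem hk, hck']))
    have heq : (PySem.Chars.find l [c]).toNat = k := by omega
    simp only [Option.map_some, Option.getD_some]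
    omega

-- filters over the enumeration of an all-non-matching block
lemma filter_enumerate_none (l : List Char) (i : Int) (c : Char) (h : ∀ x ∈ l, (x == c) = false) :
    ((PySem.List.enumerate l i).filter (fun p => (p.2 == c))) = [] ∧
    ((PySem.List.enumerate l i).filter (fun p => !(p.2 == c))) = PySem.List.enumerate l i := by
  constructor
  · rw [List.filter_eq_nil_iff]
    intro p hp
    obtain ⟨k, hk, rfl⟩ := (PySem.List.mem_enumerate_iff l i p).mp hp
    simp [h _ (List.getElem_mem hk)]
  · rw [List.filter_eq_self]
    intro p hp
    obtain ⟨k, hk, rfl⟩ := (PySem.List.mem_enumerate_iff l i p).mp hp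
    simp [h _ (List.getElem_mem hk)]

-- B's jump loop computes the same two filtered flat-maps.
lemma findAltGo_eq_aux (c : Char) (n : Nat) : ∀ (cs : List Char) (i : Int), cs.length ≤ n →
    findAltGo c cs i =
      (((PySem.List.enumerate cs i).filter (fun p => !(p.2 == c))).flatMap (fun p => PySem.Int.toChars p.1),
       ((PySem.List.enumerate cs i).filter (fun p => p.2 == c)).flatMap (fun p => PySem.Int.toChars p.1)) := by
  induction n with
  | zero =>
      intro cs i hlen
      have hcs : cs = [] := List.eq_nil_of_length_eq_zero (by omega)
      subst hcs
      rw [findAltGo]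
      have hf : PySem.Chars.find ([] : List Char) [c] = -1 := by rw [find_singleton]; simp
      simp [hf, PySem.List.enumerate_nil]
  | succ n ih =>
      intro cs i hlen
      rw [findAltGo, find_singleton]
      cases h : cs.findIdx? (fun x => x == c) with
      | none =>
          simp only [Option.map_none, Option.getD_none]
          have hall : ∀ x ∈ cs, (x == c) = false := List.findIdx?_eq_none_iff.mp h
          obtain ⟨h1, h2⟩ := filter_enumerate_none cs i c hall
          rw [h1, h2]
          simp [flatMap_enumerate_all]
      | some k =>
          obtain ⟨hk, hck, hmin⟩ := List.findIdx?_eq_some_iff_getElem.mp h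
          have hck' : cs[k] = c := by simpa using hck
          simp only [Option.map_some, Option.getD_some]
          rw [if_neg (by omega : ¬ ((k : Int) = -1))]
          have htoNat : ((k : Int)).toNat = k := by omega
          rw [htoNat]
          rw [ih (cs.drop (k+1)) ((i + (k : Int)) + 1) (by rw [List.length_drop]; omega)]
          have hsplit : cs = cs.take k ++ cs[k] :: cs.drop (k+1) := by
            conv_lhs => rw [← List.take_append_drop k cs]
            rw [List.drop_eq_getElem_cons hk]
          have htk : ((cs.take k).length : Int) = (k : Int) := by
            simp [List.length_take]; omega
          have hallt : ∀ x ∈ cs.take k, (x == c) = false := by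
            intro x hx
            obtain ⟨j, hj, hj2⟩ := List.mem_take_iff_getElem.mp hx
            have hnp := hmin j (by omega)
            subst hj2
            simpa using hnp
          obtain ⟨ht1, ht2⟩ := filter_enumerate_none (cs.take k) i c hallt
          conv_rhs => rw [hsplit]
          rw [hck', PySem.List.enumerate_append, PySem.List.enumerate_cons, htk]
          simp only [List.filter_append, List.filter_cons, ht1, ht2]
          simp only [beq_self_eq_true, Bool.not_true, if_true, if_false, Bool.false_eq_true,
                     List.flatMap_append, List.flatMap_cons]
          simp only [Prod.mk.injEq, List.flatMap_nil, List.nil_append]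
          constructor
          · rw [flatMap_enumerate_all, htk]
          · trivial

lemma findAltGo_eq (c : Char) (cs : List Char) (i : Int) :
    findAltGo c cs i =
      (((PySem.List.enumerate cs i).filter (fun p => !(p.2 == c))).flatMap (fun p => PySem.Int.toChars p.1),
       ((PySem.List.enumerate cs i).filter (fun p => p.2 == c)).flatMap (fun p => PySem.Int.toChars p.1)) :=
  findAltGo_eq_aux c cs.length cs i le_rfl

-- ===== VERDICT (by name: the statement is the Claim_ definition above) =====
theorem find_spec : Claim_equal_find := by
  intro strng ch _
  unfold Spec_find
  cases hch : ch.toList with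
  | nil =>
      have hf : ∀ p : Int × Char, ([p.2] == ([] : List Char)) = false := by intro p; simp
      simp [find, find_alt, hch, findGo_eq, hf, flatMap_enumerate_all]
  | cons c t =>
      cases t with
      | nil =>
          have hf : ∀ p : Int × Char, ([p.2] == [c]) = (p.2 == c) := by intro p; simp
          simp [find, find_alt, hch, findGo_eq, findAltGo_eq, hf]
      | cons d t' =>
          have hf : ∀ p : Int × Char, ([p.2] == (c :: d :: t')) = false := by intro p; simp
          simp [find, find_alt, hch, findGo_eq, hf, flatMap_enumerate_all]
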